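-- pv_equiv track=rewrite | github.com/luizaugustoliveira/Algoritmos | Testes_Scripts/ofuscador.py | ofuscador
-- ===== SOURCE A (Python) =====
-- def ofuscador(linha):
--     asteriscos = 0
--     nova_linha = ""
--     for i in range(len(linha)):
--         if type(linha[i]) == str:
--             if 97 <= ord(linha[i]) <= 122:
--                 nova_linha += chr(ord(linha[i]) - 32)
--                 asteriscos += 1
--             elif 65 <= ord(linha[i]) <= 90:
--                 nova_linha += chr(ord(linha[i]) + 32)
--                 asteriscos += 1
--             elif linha[i] == " ":
--                 nova_linha += "*" * asteriscos
--                 asteriscos = 0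
--             else:
--                 nova_linha += linha[i]
--                 asteriscos += 1
--         else:
--             nova_linha += linha[i]
--             asteriscos += 1
--
--     linha_final = ""
--     for i in range(len(nova_linha)):
--         if nova_linha[i] == "A" or nova_linha[i] == "a":
--             linha_final += "4"
--         elif nova_linha[i] == "B" or nova_linha[i] == "b":
--             linha_final += "8"
--         elif nova_linha[i] == "E" or nova_linha[i] == "e":
--             linha_final += "3"
--         elif nova_linha[i] == "G" or nova_linha[i] == "g":
--             linha_final += "6"
--         elif nova_linha[i] == "I" or nova_linha[i] == "i":
--             linha_final += "1"
--         elif nova_linha[i] == "L" or nova_linha[i] == "l":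
--             linha_final += "7"
--         elif nova_linha[i] == "S" or nova_linha[i] == "s":
--             linha_final += "5"
--         elif nova_linha[i] == "O" or nova_linha[i] == "o":
--             linha_final += "0"
--         elif nova_linha[i] == "4":
--             linha_final += "A"
--         elif nova_linha[i] == "8":
--             linha_final += "B"
--         elif nova_linha[i] == "3":
--             linha_final += "E"
--         elif nova_linha[i] == "6":
--             linha_final += "G"
--         elif nova_linha[i] == "1":
--             linha_final += "I"
--         elif nova_linha[i] == "7":
--             linha_final += "L"
--         elif nova_linha[i] == "5":
--             linha_final += "S"
--         elif nova_linha[i] == "0":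
--             linha_final += "O"
--         else:
--             linha_final += nova_linha[i]
--
--     return linha_final
-- ===== SOURCE B (Python) =====
-- LEET = {'a': '4', 'A': '4', 'b': '8', 'B': '8', 'e': '3', 'E': '3',
--         'g': '6', 'G': '6', 'i': '1', 'I': '1', 'l': '7', 'L': '7',
--         's': '5', 'S': '5', 'o': '0', 'O': '0',
--         '4': 'A', '8': 'B', '3': 'E', '6': 'G',
--         '1': 'I', '7': 'L', '5': 'S', '0': 'O'}
--
--
-- def ofuscador(linha):
--     asteriscos = 0
--     partes = []
--     for ch in linha:
--         if 'a' <= ch <= 'z':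
--             sw = chr(ord(ch) - 32)
--             partes.append(LEET.get(sw, sw))
--             asteriscos += 1
--         elif 'A' <= ch <= 'Z':
--             sw = chr(ord(ch) + 32)
--             partes.append(LEET.get(sw, sw))
--             asteriscos += 1
--         elif ch == ' ':
--             partes.append('*' * asteriscos)
--             asteriscos = 0
--         else:
--             partes.append(LEET.get(ch, ch))
--             asteriscos += 1
--     return ''.join(partes)
-- ===== Notes on version B (the rewrite author's own statement) =====
-- stated objective: simpler
-- what changed: Replaces A's two sequential passes (build an intermediate case-swapped string, then re-scan it through a 17-branch if/elif leet chain) with a single pass that applies one 24-entry leet lookup table to each character as it is produced, collecting pieces in a list joined once.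
import Mathlib
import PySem

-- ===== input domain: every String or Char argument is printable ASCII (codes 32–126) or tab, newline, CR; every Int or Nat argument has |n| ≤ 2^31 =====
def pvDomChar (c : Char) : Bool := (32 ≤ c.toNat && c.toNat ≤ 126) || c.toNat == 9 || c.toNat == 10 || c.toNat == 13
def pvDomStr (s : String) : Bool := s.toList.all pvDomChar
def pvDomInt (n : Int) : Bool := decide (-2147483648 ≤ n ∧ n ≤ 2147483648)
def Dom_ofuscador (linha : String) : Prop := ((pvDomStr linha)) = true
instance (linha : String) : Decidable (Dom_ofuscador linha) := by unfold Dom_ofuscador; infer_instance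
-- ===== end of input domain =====

-- B is a single pass that case-swaps/counts asterisks and leet-maps each produced
-- character through one lookup table at once (objective: simpler decomposition).

-- ===== PORT A =====
-- first loop of A: case swap, spaces -> '*'*asteriscos; string concatenation as List Char append
def ofA1 : List Char → Nat → List Char → List Char
  | [], _, acc => acc
  | c :: rest, ast, acc =>
    if 97 ≤ c.toNat ∧ c.toNat ≤ 122 then
      ofA1 rest (ast + 1) (acc ++ [Char.ofNat (c.toNat - 32)])
    else if 65 ≤ c.toNat ∧ c.toNat ≤ 90 then
      ofA1 rest (ast + 1) (acc ++ [Char.ofNat (c.toNat + 32)])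
    else if c = ' ' then
      ofA1 rest 0 (acc ++ List.replicate ast '*')
    else
      ofA1 rest (ast + 1) (acc ++ [c])

-- second loop of A: the leetspeak if-chain, transcribed branch for branch
def ofA2 : List Char → List Char → List Char
  | [], acc => acc
  | c :: rest, acc =>
    ofA2 rest (acc ++
      [if c = 'A' ∨ c = 'a' then '4'
       else if c = 'B' ∨ c = 'b' then '8'
       else if c = 'E' ∨ c = 'e' then '3'
       else if c = 'G' ∨ c = 'g' then '6'
       else if c = 'I' ∨ c = 'i' then '1'
       else if c = 'L' ∨ c = 'l' then '7'
       else if c = 'S' ∨ c = 's' then '5'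
       else if c = 'O' ∨ c = 'o' then '0'
       else if c = '4' then 'A'
       else if c = '8' then 'B'
       else if c = '3' then 'E'
       else if c = '6' then 'G'
       else if c = '1' then 'I'
       else if c = '7' then 'L'
       else if c = '5' then 'S'
       else if c = '0' then 'O'
       else c])

def ofuscador (linha : String) : String :=
  String.ofList (ofA2 (ofA1 linha.toList 0 []) [])

-- ===== PORT B =====
-- the LEET dict of Source B
def LEET : PySem.Dict Char Char := PySem.Dict.mk  -- dict literal, 24 distinct keys
  [('a', '4'), ('A', '4'), ('b', '8'), ('B', '8'), ('e', '3'), ('E', '3'),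
   ('g', '6'), ('G', '6'), ('i', '1'), ('I', '1'), ('l', '7'), ('L', '7'),
   ('s', '5'), ('S', '5'), ('o', '0'), ('O', '0'),
   ('4', 'A'), ('8', 'B'), ('3', 'E'), ('6', 'G'),
   ('1', 'I'), ('7', 'L'), ('5', 'S'), ('0', 'O')]

-- B's single loop: swap case / emit asterisks, then LEET.get(sw, sw) immediately
def ofB : List Char → Nat → List Char → List Char
  | [], _, acc => acc
  | c :: rest, ast, acc =>
    if 'a' ≤ c ∧ c ≤ 'z' then
      let sw := Char.ofNat (c.toNat - 32)
      ofB rest (ast + 1) (acc ++ [LEET.getD sw sw])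
    else if 'A' ≤ c ∧ c ≤ 'Z' then
      let sw := Char.ofNat (c.toNat + 32)
      ofB rest (ast + 1) (acc ++ [LEET.getD sw sw])
    else if c = ' ' then
      ofB rest 0 (acc ++ List.replicate ast '*')
    else
      ofB rest (ast + 1) (acc ++ [LEET.getD c c])

def ofuscador_alt (linha : String) : String :=
  String.ofList (ofB linha.toList 0 [])

-- ===== PRECONDITION & SPEC =====
def Spec_ofuscador (linha : String) (out : String) : Prop := out = ofuscador_alt linha
instance (linha : String) (out : String) : Decidable (Spec_ofuscador linha out) := by unfold Spec_ofuscador; infer_instance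

-- ===== CLAIM (what is proved, stated in full; the proofs are below) =====
def Claim_equal_ofuscador : Prop := ∀ (linha : String), Dom_ofuscador linha → Spec_ofuscador linha (ofuscador linha)

-- ===== LEMMAS AND PROOFS =====

-- the leet substitution as a function (identical chain to ofA2's step)
def leetA (c : Char) : Char :=
  if c = 'A' ∨ c = 'a' then '4'
  else if c = 'B' ∨ c = 'b' then '8'
  else if c = 'E' ∨ c = 'e' then '3'
  else if c = 'G' ∨ c = 'g' then '6'
  else if c = 'I' ∨ c = 'i' then '1'
  else if c = 'L' ∨ c = 'l' then '7'
  else if c = 'S' ∨ c = 's' then '5'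
  else if c = 'O' ∨ c = 'o' then '0'
  else if c = '4' then 'A'
  else if c = '8' then 'B'
  else if c = '3' then 'E'
  else if c = '6' then 'G'
  else if c = '1' then 'I'
  else if c = '7' then 'L'
  else if c = '5' then 'S'
  else if c = '0' then 'O'
  else c

theorem leet_getD (c : Char) : LEET.getD c c = leetA c := by
  by_cases h0 : c = 'a'
  · subst h0; decide
  by_cases h1 : c = 'A'
  · subst h1; decide
  by_cases h2 : c = 'b'
  · subst h2; decide
  by_cases h3 : c = 'B'
  · subst h3; decide
  by_cases h4 : c = 'e'
  · subst h4; decide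
  by_cases h5 : c = 'E'
  · subst h5; decide
  by_cases h6 : c = 'g'
  · subst h6; decide
  by_cases h7 : c = 'G'
  · subst h7; decide
  by_cases h8 : c = 'i'
  · subst h8; decide
  by_cases h9 : c = 'I'
  · subst h9; decide
  by_cases h10 : c = 'l'
  · subst h10; decide
  by_cases h11 : c = 'L'
  · subst h11; decide
  by_cases h12 : c = 's'
  · subst h12; decide
  by_cases h13 : c = 'S'
  · subst h13; decide
  by_cases h14 : c = 'o'
  · subst h14; decide
  by_cases h15 : c = 'O'
  · subst h15; decide
  by_cases h16 : c = '4'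
  · subst h16; decide
  by_cases h17 : c = '8'
  · subst h17; decide
  by_cases h18 : c = '3'
  · subst h18; decide
  by_cases h19 : c = '6'
  · subst h19; decide
  by_cases h20 : c = '1'
  · subst h20; decide
  by_cases h21 : c = '7'
  · subst h21; decide
  by_cases h22 : c = '5'
  · subst h22; decide
  by_cases h23 : c = '0'
  · subst h23; decide
  simp_all [LEET, leetA, PySem.Dict.getD_eq_get?_getD,
    PySem.Dict.get?, @eq_comm Char]

theorem ofA1_append (cs : List Char) : ∀ (ast : Nat) (acc : List Char),
    ofA1 cs ast acc = acc ++ ofA1 cs ast [] := by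
  induction cs with
  | nil => intro ast acc; simp [ofA1]
  | cons c rest ih =>
    intro ast acc
    simp only [ofA1]
    split_ifs <;> rw [ih, ih _ (_ ++ _)] <;> simp

theorem ofB_append (cs : List Char) : ∀ (ast : Nat) (acc : List Char),
    ofB cs ast acc = acc ++ ofB cs ast [] := by
  induction cs with
  | nil => intro ast acc; simp [ofB]
  | cons c rest ih =>
    intro ast acc
    simp only [ofB]
    split_ifs <;> rw [ih, ih _ (_ ++ _)] <;> simp

theorem ofA2_map (cs : List Char) : ∀ (acc : List Char),
    ofA2 cs acc = acc ++ cs.map leetA := by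
  induction cs with
  | nil => intro acc; simp [ofA2]
  | cons c rest ih =>
    intro acc
    simp only [ofA2, ih, List.map_cons]
    simp [leetA]

theorem leetA_star : leetA '*' = '*' := by decide

theorem lower_iff (c : Char) : ('a' ≤ c ∧ c ≤ 'z') ↔ (97 ≤ c.toNat ∧ c.toNat ≤ 122) := by
  constructor <;> exact fun h => ⟨h.1, h.2⟩

theorem upper_iff (c : Char) : ('A' ≤ c ∧ c ≤ 'Z') ↔ (65 ≤ c.toNat ∧ c.toNat ≤ 90) := by
  constructor <;> exact fun h => ⟨h.1, h.2⟩

theorem main_eq (cs : List Char) : ∀ (ast : Nat),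
    (ofA1 cs ast []).map leetA = ofB cs ast [] := by
  induction cs with
  | nil => intro ast; rfl
  | cons c rest ih =>
    intro ast
    simp only [ofA1, ofB, lower_iff, upper_iff]
    split_ifs with h1 h2 h3
    · rw [ofA1_append, ofB_append rest]
      simp [ih, leet_getD]
    · rw [ofA1_append, ofB_append rest]
      simp [ih, leet_getD]
    · rw [ofA1_append, ofB_append rest]
      simp [ih, leetA_star]
    · rw [ofA1_append, ofB_append rest]
      simp [ih, leet_getD]

-- ===== VERDICT (by name: the statement is the Claim_ definition above) =====
theorem ofuscador_spec : Claim_equal_ofuscador := by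
  intro linha _
  show ofuscador linha = ofuscador_alt linha
  unfold ofuscador ofuscador_alt
  rw [ofA2_map, List.nil_append, main_eq]
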